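-- pv_equiv track=rewrite | github.com/SL-PROGRAM/Mooc | UPYLAB-6-7.py | prime_odd_numbers
-- ===== SOURCE A (Python) =====
-- def prime_odd_numbers(numbers):
--     def even(max_nb):
--         even = set()
--         for elem in max_nb:
--             if elem % 2 == 0:
--                 even.add(elem)
--         return even
--
--     def prime_numbers(max_nb):
--         lst_prime = set()
--         for elem in max_nb:
--             prime = True
--             nb_prime = elem
--             if elem <= 1:
--                 prime = False
--             for i in range(2, elem):
--                 if elem % i == 0:
--                     prime = False
--             if prime == True:
--                 lst_prime.add(nb_prime)
--         return lst_prime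
--
--     prime = prime_numbers(numbers)
--     lst_even =  even(numbers)
--     odd = set(numbers)- set(lst_even)
--     return (prime, odd)
-- ===== SOURCE B (Python) =====
-- def prime_odd_numbers(numbers):
--     def is_prime(n):
--         if n <= 1:
--             return False
--         if n % 2 == 0:
--             return n == 2
--         i = 3
--         while i * i <= n:
--             if n % i == 0:
--                 return False
--             i += 2
--         return True
--
--     return ({x for x in numbers if is_prime(x)}, {x for x in numbers if x % 2 != 0})
-- ===== Notes on version B (the rewrite author's own statement) =====
-- stated objective: faster
-- what changed: Primality is decided by sqrt-bounded odd-step trial division (early-exit while i*i<=n loop) instead of A's full scan of range(2, elem) with a flag, and the result pair is built by two set comprehensions over numbers instead of A's three staged passes (prime loop, even-set loop, set-difference for the odds).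
import Mathlib
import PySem

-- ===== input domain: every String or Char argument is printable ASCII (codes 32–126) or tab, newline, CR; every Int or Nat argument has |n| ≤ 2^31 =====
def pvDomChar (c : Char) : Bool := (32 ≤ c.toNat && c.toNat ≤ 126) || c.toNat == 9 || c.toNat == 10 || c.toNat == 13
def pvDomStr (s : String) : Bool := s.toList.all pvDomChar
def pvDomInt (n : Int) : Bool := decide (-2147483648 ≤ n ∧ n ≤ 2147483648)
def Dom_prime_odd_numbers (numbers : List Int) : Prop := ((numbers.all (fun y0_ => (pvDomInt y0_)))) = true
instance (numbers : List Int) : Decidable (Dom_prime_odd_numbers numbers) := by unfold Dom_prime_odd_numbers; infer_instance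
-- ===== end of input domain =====

-- B replaces A's full-range trial division (every i in range(2, elem)) by a sqrt-bounded
-- odd-step trial division, and A's three staged passes (prime scan, even-set build,
-- set-difference for the odds) by two set comprehensions over `numbers`.

-- ===== PORT A =====
def prime_odd_numbers (numbers : List Int) : List Int × List Int :=
  -- helper prime_numbers, inlined as the fold it is
  let prime : PySem.Set Int :=
    numbers.foldl (fun lst_prime elem =>
      let prime0 : Bool := true
      let prime1 : Bool := if elem ≤ 1 then false else prime0
      let prime2 : Bool :=
        (PySem.List.pyRange 2 elem 1).foldl
          (fun p i => if PySem.Int.mod elem i == 0 then false else p) prime1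
      if prime2 == true then PySem.Set.add lst_prime elem else lst_prime) PySem.Set.empty
  -- helper even
  let lst_even : PySem.Set Int :=
    numbers.foldl (fun ev elem =>
      if PySem.Int.mod elem 2 == 0 then PySem.Set.add ev elem else ev) PySem.Set.empty
  let odd : PySem.Set Int := PySem.Set.diff (PySem.Set.ofList numbers) (PySem.Set.ofList lst_even)
  (prime, odd)

-- ===== PORT B =====
-- the `while i * i <= n` loop of is_prime (i starts at 3, steps by 2)
def trialLoop (n i : Int) : Bool :=
  if _h : i * i ≤ n then
    if PySem.Int.mod n i == 0 then false else trialLoop n (i + 2)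
  else true
termination_by (n + 2 - i).toNat
decreasing_by
  have hin : i ≤ n := by nlinarith [mul_self_nonneg i]
  omega

def isPrimeB (n : Int) : Bool :=
  if n ≤ 1 then false
  else if PySem.Int.mod n 2 == 0 then n == 2
  else trialLoop n 3

def prime_odd_numbers_alt (numbers : List Int) : List Int × List Int :=
  (PySem.Set.ofList (numbers.filter isPrimeB),
   PySem.Set.ofList (numbers.filter (fun x => PySem.Int.mod x 2 != 0)))

-- ===== PRECONDITION & SPEC =====
def Spec_prime_odd_numbers (numbers : List Int) (out : List Int × List Int) : Prop := out = prime_odd_numbers_alt numbers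
instance (numbers : List Int) (out : List Int × List Int) : Decidable (Spec_prime_odd_numbers numbers out) := by unfold Spec_prime_odd_numbers; infer_instance

-- ===== CLAIM (what is proved, stated in full; the proofs are below) =====
def Claim_equal_prime_odd_numbers : Prop := ∀ (numbers : List Int), Dom_prime_odd_numbers numbers → Spec_prime_odd_numbers numbers (prime_odd_numbers numbers)

-- ===== LEMMAS AND PROOFS =====

-- A's per-element prime flag (initialised from `elem ≤ 1`, cleared by the divisor loop)
-- equals `elem > 1` and "no divisor in range(2, elem)".
theorem primeCondA_eq (elem : Int) :
    (((PySem.List.pyRange 2 elem 1).foldl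
        (fun p i => if PySem.Int.mod elem i == 0 then false else p)
        (if elem ≤ 1 then false else true)) == true)
    = (decide (1 < elem) && (PySem.List.pyRange 2 elem 1).all (fun i => PySem.Int.mod elem i != 0)) := by
  rw [PySem.List.foldl_if_false_eq]
  by_cases h : elem ≤ 1
  · simp [h, show ¬ (1 : Int) < elem from by omega]
  · simp [h, show (1 : Int) < elem from by omega, bne, List.not_any_eq_all_not]

-- the while-loop tests exactly the numbers i, i+2, i+4, … whose square is ≤ n
theorem trialLoop_eq_true_iff (n i : Int) (hi : 0 < i) :
    trialLoop n i = true ↔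
      ∀ k : Nat, (i + 2 * k) * (i + 2 * k) ≤ n → ¬ ((i + 2 * k) ∣ n) := by
  induction i using trialLoop.induct (n := n) with
  | case1 i hsq hdvd =>
    rw [trialLoop]
    rw [dif_pos hsq, if_pos hdvd]
    simp only [Bool.false_eq_true, false_iff]
    intro h
    exact h 0 (by simpa using hsq)
      (by simpa using (PySem.Int.mod_eq_zero_iff_dvd n i).mp (by simpa using hdvd))
  | case2 i hsq hdvd ih =>
    rw [trialLoop]
    rw [dif_pos hsq, if_neg hdvd]
    rw [ih (by omega)]
    constructor
    · intro h k hk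
      cases k with
      | zero =>
        intro hd
        simp only [Nat.cast_zero, mul_zero, add_zero] at hk hd
        exact hdvd (by simpa using (PySem.Int.mod_eq_zero_iff_dvd n i).mpr hd)
      | succ k' =>
        intro hd
        refine h k' ?_ ?_
        · push_cast at hk ⊢; nlinarith [hk]
        · push_cast at hd ⊢
          have : i + 2 * ((k' : Int) + 1) = i + 2 + 2 * k' := by ring
          rwa [this] at hd
    · intro h k hk hd
      refine h (k + 1) ?_ ?_
      · push_cast at hk ⊢; nlinarith [hk]
      · push_cast at hd ⊢
        have : i + 2 * ((k : Int) + 1) = i + 2 + 2 * k := by ring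
        rwa [← this] at hd
  | case3 i hsq =>
    rw [trialLoop]
    rw [dif_neg hsq]
    simp only [true_iff]
    intro k hk
    exfalso
    apply hsq
    nlinarith [Int.natCast_nonneg k]

-- for odd n ≥ 3, the sqrt-bounded odd-step scan decides the same thing as
-- scanning every i in range(2, n)
theorem full_iff_sqrt (n : Int) (hn : 3 ≤ n) (hodd : ¬ ((2 : Int) ∣ n)) :
    (∀ i : Int, 2 ≤ i → i < n → ¬ (i ∣ n)) ↔
      (∀ k : Nat, ((3 : Int) + 2 * k) * (3 + 2 * k) ≤ n → ¬ (((3 : Int) + 2 * k) ∣ n)) := by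
  constructor
  · intro h k hk hd
    exact h _ (by nlinarith [Int.natCast_nonneg k]) (by nlinarith [Int.natCast_nonneg k]) hd
  · intro h i h2 hlt hd
    -- move to Nat and use the least prime factor of n
    set N := n.toNat with hN
    have hnN : (N : Int) = n := Int.toNat_of_nonneg (by omega)
    have hNdvd : i.toNat ∣ N := by
      have : (i.toNat : Int) ∣ (N : Int) := by
        rw [hnN, Int.toNat_of_nonneg (by omega : (0:Int) ≤ i)]; exact hd
      exact_mod_cast this
    have hN2 : 2 ≤ N := by omega
    have hnotp : ¬ N.Prime := by
      intro hp
      have := (Nat.prime_def_lt.mp hp).2 i.toNat (by omega) hNdvd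
      omega
    have hp := Nat.minFac_prime (show N ≠ 1 by omega)
    have hpd : N.minFac ∣ N := Nat.minFac_dvd N
    have hp2 : N.minFac ≠ 2 := by
      intro h2'
      apply hodd
      have : (2 : Nat) ∣ N := h2' ▸ hpd
      have : ((2 : Nat) : Int) ∣ (N : Int) := by exact_mod_cast this
      simpa [hnN] using this
    have hpodd : Odd N.minFac := Nat.Prime.odd_of_ne_two hp hp2
    have hp3 : 3 ≤ N.minFac := by
      have := hp.two_le
      rcases hpodd with ⟨m, hm⟩
      omega
    have hsq : N.minFac * N.minFac ≤ N := by
      have := Nat.minFac_sq_le_self (show 0 < N by omega) hnotp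
      simpa [pow_two] using this
    obtain ⟨k, hk⟩ : ∃ k : Nat, N.minFac = 3 + 2 * k := by
      rcases hpodd with ⟨m, hm⟩
      exact ⟨m - 1, by omega⟩
    apply h k
    · have : ((N.minFac : Int)) * (N.minFac : Int) ≤ (N : Int) := by exact_mod_cast hsq
      rw [hnN] at this
      convert this using 2 <;> (rw [hk]; push_cast; ring)
    · have : ((N.minFac : Int)) ∣ (N : Int) := by exact_mod_cast hpd
      rw [hnN] at this
      convert this using 1
      rw [hk]; push_cast; ring

-- A's per-element prime condition coincides with B's is_prime
theorem primeCond_eq_isPrimeB (elem : Int) :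
    (decide (1 < elem) && (PySem.List.pyRange 2 elem 1).all (fun i => PySem.Int.mod elem i != 0))
    = isPrimeB elem := by
  unfold isPrimeB
  by_cases h1 : elem ≤ 1
  · simp [h1, show ¬ (1:Int) < elem by omega]
  · rw [not_le] at h1
    have hall : ((PySem.List.pyRange 2 elem 1).all (fun i => PySem.Int.mod elem i != 0) = true)
        ↔ (∀ i : Int, 2 ≤ i → i < elem → ¬ (i ∣ elem)) := by
      simp only [List.all_eq_true, PySem.List.mem_pyRange_one, bne_iff_ne, ne_eq]
      constructor
      · intro h i hi1 hi2 hd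
        exact h i ⟨hi1, hi2⟩ ((PySem.Int.mod_eq_zero_iff_dvd elem i).mpr hd)
      · intro h i hi hm
        exact h i hi.1 hi.2 ((PySem.Int.mod_eq_zero_iff_dvd elem i).mp hm)
    by_cases h2 : PySem.Int.mod elem 2 == 0
    · -- elem even: prime iff elem = 2
      have hdvd2 : (2 : Int) ∣ elem := (PySem.Int.mod_eq_zero_iff_dvd elem 2).mp (by simpa using h2)
      rw [if_neg (show ¬ elem ≤ 1 by omega), if_pos h2]
      by_cases he2 : elem = 2
      · subst he2
        simp [PySem.List.pyRange_one_eq_nil (by omega : (2 : Int) ≤ 2)]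
      · have h3 : 3 ≤ elem := by omega
        have : ¬ (∀ i : Int, 2 ≤ i → i < elem → ¬ (i ∣ elem)) := by
          intro h
          exact h 2 (le_refl _) (by omega) hdvd2 |>.elim
        simp only [show (1:Int) < elem by omega, decide_true, Bool.true_and]
        rw [show (elem == 2) = false by simpa using he2]
        rw [← Bool.not_eq_true]
        intro hc
        exact this (hall.mp hc)
    · -- elem odd and > 1, hence ≥ 3
      have hodd : ¬ ((2 : Int) ∣ elem) := by
        intro hd
        exact h2 (by simpa using (PySem.Int.mod_eq_zero_iff_dvd elem 2).mpr hd)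
      have h3 : 3 ≤ elem := by
        rcases (em (elem = 2)) with h | h
        · exact absurd (h ▸ ⟨1, by ring⟩) hodd
        · omega
      rw [if_neg (show ¬ elem ≤ 1 by omega), if_neg h2]
      simp only [show (1:Int) < elem by omega, decide_true, Bool.true_and]
      rw [Bool.eq_iff_iff, hall, trialLoop_eq_true_iff elem 3 (by omega)]
      exact full_iff_sqrt elem h3 hodd
  
-- filter commutes with set(), preserving first-occurrence order
theorem ofList_filter (q : Int → Bool) (xs : List Int) :
    PySem.Set.ofList (xs.filter q) = (PySem.Set.ofList xs).filter q := by
  induction xs with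
  | nil => simp [PySem.Set.ofList_nil]
  | cons x xs ih =>
    by_cases hq : q x
    · rw [List.filter_cons_of_pos hq, PySem.Set.ofList_cons, PySem.Set.ofList_cons,
        List.filter_cons_of_pos hq, ih, PySem.Set.discard, PySem.Set.discard,
        List.filter_filter, List.filter_filter]
      congr 1
      apply List.filter_congr
      intro a _
      rw [Bool.and_comm]
    · rw [List.filter_cons_of_neg hq, PySem.Set.ofList_cons,
        List.filter_cons_of_neg hq, ih, PySem.Set.discard, List.filter_filter]
      apply List.filter_congr
      intro a ha
      by_cases hax : a = x
      · subst hax; simp [hq]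
      · simp [hax]

-- A's primes (flag loop + set.add) are B's set comprehension over is_prime
theorem primes_eq (xs : List Int) :
    xs.foldl (fun lst_prime elem =>
      if (((PySem.List.pyRange 2 elem 1).foldl
            (fun p i => if PySem.Int.mod elem i == 0 then false else p)
            (if elem ≤ 1 then false else true)) == true)
      then PySem.Set.add lst_prime elem else lst_prime) PySem.Set.empty
    = PySem.Set.ofList (xs.filter isPrimeB) := by
  rw [PySem.List.foldl_if_eq_foldl_filter]
  show (xs.filter _).foldl PySem.Set.add [] = _
  rw [← PySem.Set.ofList_eq_foldl]
  congr 1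
  apply List.filter_congr
  intro a _
  rw [primeCondA_eq, primeCond_eq_isPrimeB]

-- A's odds (set(numbers) minus the even set) are B's odds (the direct comprehension)
theorem odds_eq (xs : List Int) :
    PySem.Set.diff (PySem.Set.ofList xs)
      (PySem.Set.ofList (xs.foldl (fun ev elem =>
        if PySem.Int.mod elem 2 == 0 then PySem.Set.add ev elem else ev) PySem.Set.empty))
    = PySem.Set.ofList (xs.filter (fun x => PySem.Int.mod x 2 != 0)) := by
  rw [PySem.List.foldl_if_eq_foldl_filter]
  show PySem.Set.diff _ (PySem.Set.ofList (List.foldl PySem.Set.add [] _)) = _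
  rw [← PySem.Set.ofList_eq_foldl, PySem.Set.ofList_ofList]
  rw [ofList_filter, ofList_filter, PySem.Set.diff]
  apply List.filter_congr
  intro a ha
  have hc : (PySem.Set.contains ((PySem.Set.ofList xs).filter (fun e => PySem.Int.mod e 2 == 0)) a)
      = (PySem.Int.mod a 2 == 0) := by
    by_cases h2 : (PySem.Int.mod a 2 == 0) = true
    · have hm : a ∈ (PySem.Set.ofList xs).filter (fun e => PySem.Int.mod e 2 == 0) :=
        List.mem_filter.mpr ⟨ha, h2⟩
      rw [h2]
      exact PySem.Set.contains_iff _ _ |>.mpr hm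
    · have hm : a ∉ (PySem.Set.ofList xs).filter (fun e => PySem.Int.mod e 2 == 0) :=
        fun hmem => h2 (List.mem_filter.mp hmem).2
      rw [Bool.eq_false_iff.mpr h2] at *
      simpa [PySem.Set.contains, List.contains_eq_mem] using hm
  rw [hc]
  simp [bne]

-- ===== VERDICT (by name: the statement is the Claim_ definition above) =====
theorem prime_odd_numbers_spec : Claim_equal_prime_odd_numbers := by
  intro numbers _
  show prime_odd_numbers numbers = prime_odd_numbers_alt numbers
  unfold prime_odd_numbers prime_odd_numbers_alt
  exact Prod.ext (primes_eq numbers) (odds_eq numbers)
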